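-- pv_equiv track=rewrite | github.com/chlendyd7/Algorithm | Python/레거시/BJO/동적계획법/동적 계획법 2/양팔저울/240618.py | can_measure
-- ===== SOURCE A (Python) =====
-- def can_measure(beads, weights):
--     possible = set([0])
--
--     for weight in weights:
--         new_possible = set()
--         for p in possible:
--             new_possible.add(p + weight)
--             new_possible.add(abs(p - weight))
--         possible.update(new_possible)
--
--     results = []
--     for bead in beads:
--         if bead in possible:
--             results.append('Y')
--         else:
--             results.append('N')
--     return results
-- ===== SOURCE B (Python) =====
-- def can_measure(beads, weights):
--     reachable = set()
--
--     def explore(i, v):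
--         if i == len(weights):
--             reachable.add(v)
--             return
--         w = weights[i]
--         explore(i + 1, v)
--         explore(i + 1, v + w)
--         explore(i + 1, abs(v - w))
--
--     explore(0, 0)
--     return ['Y' if bead in reachable else 'N' for bead in beads]
-- ===== Notes on version B (the rewrite author's own statement) =====
-- stated objective: alternative
-- what changed: Replaces the incremental set-DP (extend a growing 'possible' set weight by weight with union) by a recursive depth-first enumeration of the three choices (skip / add / abs-subtract) per weight, collecting only the leaf values into a set.
import Mathlib
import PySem

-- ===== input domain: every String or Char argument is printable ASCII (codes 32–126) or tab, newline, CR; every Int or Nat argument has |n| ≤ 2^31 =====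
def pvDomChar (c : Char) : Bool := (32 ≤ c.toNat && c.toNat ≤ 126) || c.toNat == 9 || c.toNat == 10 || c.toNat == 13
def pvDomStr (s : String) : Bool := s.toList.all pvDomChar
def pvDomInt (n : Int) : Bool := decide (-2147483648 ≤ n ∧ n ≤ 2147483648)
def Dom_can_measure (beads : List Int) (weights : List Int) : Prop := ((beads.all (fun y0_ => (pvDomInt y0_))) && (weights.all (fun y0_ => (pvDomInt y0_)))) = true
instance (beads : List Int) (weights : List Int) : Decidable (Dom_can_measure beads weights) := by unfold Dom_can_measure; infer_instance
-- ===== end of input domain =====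

-- B replaces A's incremental set-DP by a recursive depth-first enumeration of the
-- three per-weight choices (skip / add / abs-subtract); equivalent on all inputs.

-- ===== PORT A =====
-- one iteration of A's outer loop: build new_possible from possible, then possible.update(new_possible)
def pvStepA (possible : PySem.Set Int) (weight : Int) : PySem.Set Int :=
  PySem.Set.update possible
    (possible.foldl (fun np p => PySem.Set.add (PySem.Set.add np (p + weight)) |p - weight|)
      PySem.Set.empty)

def can_measure (beads : List Int) (weights : List Int) : List String :=
  let possible := weights.foldl pvStepA (PySem.Set.ofList [0])
  beads.foldl (fun results bead =>
    results ++ [if PySem.Set.contains possible bead then "Y" else "N"]) []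

-- ===== PORT B =====
-- B's recursive explore(i, v): structural recursion on the remaining weights
def pvExplore (ws : List Int) (v : Int) (reachable : PySem.Set Int) : PySem.Set Int :=
  match ws with
  | [] => PySem.Set.add reachable v
  | w :: rest => pvExplore rest (|v - w|) (pvExplore rest (v + w) (pvExplore rest v reachable))

def can_measure_alt (beads : List Int) (weights : List Int) : List String :=
  let reachable := pvExplore weights 0 PySem.Set.empty
  beads.map (fun bead => if PySem.Set.contains reachable bead then "Y" else "N")

-- ===== PRECONDITION & SPEC =====
def Spec_can_measure (beads : List Int) (weights : List Int) (out : List String) : Prop := out = can_measure_alt beads weights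
instance (beads : List Int) (weights : List Int) (out : List String) : Decidable (Spec_can_measure beads weights out) := by unfold Spec_can_measure; infer_instance

-- ===== CLAIM (what is proved, stated in full; the proofs are below) =====
def Claim_equal_can_measure : Prop := ∀ (beads : List Int) (weights : List Int), Dom_can_measure beads weights → Spec_can_measure beads weights (can_measure beads weights)

-- ===== LEMMAS AND PROOFS =====

-- 'x is reachable from running value v through the remaining weights ws'
def pvReach : List Int → Int → Int → Prop
  | [], v, x => x = v
  | w :: rest, v, x => pvReach rest v x ∨ pvReach rest (v + w) x ∨ pvReach rest (|v - w|) x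

-- B side: membership of the explore accumulator
theorem mem_pvExplore (ws : List Int) (v : Int) (r : PySem.Set Int) (x : Int) :
    x ∈ pvExplore ws v r ↔ x ∈ r ∨ pvReach ws v x := by
  induction ws generalizing v r with
  | nil => simp [pvExplore, pvReach, PySem.Set.mem_add]
  | cons w rest ih => simp [pvExplore, pvReach, ih, or_assoc]

-- A side: membership of the inner new_possible fold
theorem mem_innerFold (l : List Int) (w : Int) (N : PySem.Set Int) (x : Int) :
    x ∈ l.foldl (fun np p => PySem.Set.add (PySem.Set.add np (p + w)) |p - w|) N ↔
      x ∈ N ∨ ∃ p ∈ l, x = p + w ∨ x = |p - w| := by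
  induction l generalizing N with
  | nil => simp
  | cons p rest ih => simp [List.foldl_cons, ih, PySem.Set.mem_add, or_assoc]

theorem mem_pvStepA (S : PySem.Set Int) (w : Int) (x : Int) :
    x ∈ pvStepA S w ↔ x ∈ S ∨ ∃ p ∈ S, x = p + w ∨ x = |p - w| := by
  simp [pvStepA, PySem.Set.mem_update, mem_innerFold, PySem.Set.empty]

-- A's outer loop reaches exactly the pvReach-values of the current set's elements
theorem mem_foldl_pvStepA (ws : List Int) (S : PySem.Set Int) (x : Int) :
    x ∈ ws.foldl pvStepA S ↔ ∃ p ∈ S, pvReach ws p x := by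
  induction ws generalizing S with
  | nil => simp [pvReach]
  | cons w rest ih =>
    rw [List.foldl_cons, ih]
    constructor
    · rintro ⟨p, hp, hr⟩
      rw [mem_pvStepA] at hp
      rcases hp with hp | ⟨q, hq, rfl | rfl⟩
      · exact ⟨p, hp, Or.inl hr⟩
      · exact ⟨q, hq, Or.inr (Or.inl hr)⟩
      · exact ⟨q, hq, Or.inr (Or.inr hr)⟩
    · rintro ⟨p, hp, hr | hr | hr⟩
      · exact ⟨p, (mem_pvStepA S w p).mpr (Or.inl hp), hr⟩
      · exact ⟨p + w, (mem_pvStepA S w _).mpr (Or.inr ⟨p, hp, Or.inl rfl⟩), hr⟩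
      · exact ⟨|p - w|, (mem_pvStepA S w _).mpr (Or.inr ⟨p, hp, Or.inr rfl⟩), hr⟩

theorem contains_eq (weights : List Int) (b : Int) :
    PySem.Set.contains (weights.foldl pvStepA (PySem.Set.ofList [0])) b =
      PySem.Set.contains (pvExplore weights 0 PySem.Set.empty) b := by
  rw [Bool.eq_iff_iff, PySem.Set.contains_iff, PySem.Set.contains_iff,
    mem_foldl_pvStepA, mem_pvExplore]
  constructor
  · rintro ⟨p, hp, hr⟩
    rw [PySem.Set.mem_ofList] at hp
    simp at hp
    subst hp
    exact Or.inr hr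
  · rintro (h | h)
    · simp [PySem.Set.empty] at h
    · exact ⟨0, by simp [PySem.Set.mem_ofList], h⟩

-- ===== VERDICT (by name: the statement is the Claim_ definition above) =====
theorem can_measure_spec : Claim_equal_can_measure := by
  intro beads weights _
  unfold Spec_can_measure can_measure can_measure_alt
  dsimp only
  rw [PySem.List.foldl_append_singleton_eq_map]
  simp only [List.nil_append]
  exact List.map_congr_left fun b _ => by rw [contains_eq]
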